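-- pv_equiv track=rewrite | github.com/robin9804/RoadToDeepLearningKing | Jinu/week3/problem268.py | Fermat
-- ===== SOURCE A (Python) =====
-- def Fermat(x, y, z, k):
--
--     if k == 2:
--         return 'Good'
--
--     else:
--         if (x**k + y**k) == (z**k):
--             return 'Fermat is wrong'
--         else:
--             return Fermat(x,y,z,k-1)
-- ===== SOURCE B (Python) =====
-- def Fermat(x, y, z, k):
--     for e in range(k, 2, -1):
--         if x**e + y**e == z**e:
--             return 'Fermat is wrong'
--     return 'Good'
-- ===== Notes on version B (the rewrite author's own statement) =====
-- stated objective: simpler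
-- what changed: Replaces the tail recursion that decrements k with a single for-loop over range(k, 2, -1) with an early return, so the descending exponents are an explicit range instead of a call chain.
-- outside the precondition, e.g. on Fermat(0, 0, 0, 1): A returns 'Fermat is wrong', B returns 'Good'
import Mathlib
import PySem

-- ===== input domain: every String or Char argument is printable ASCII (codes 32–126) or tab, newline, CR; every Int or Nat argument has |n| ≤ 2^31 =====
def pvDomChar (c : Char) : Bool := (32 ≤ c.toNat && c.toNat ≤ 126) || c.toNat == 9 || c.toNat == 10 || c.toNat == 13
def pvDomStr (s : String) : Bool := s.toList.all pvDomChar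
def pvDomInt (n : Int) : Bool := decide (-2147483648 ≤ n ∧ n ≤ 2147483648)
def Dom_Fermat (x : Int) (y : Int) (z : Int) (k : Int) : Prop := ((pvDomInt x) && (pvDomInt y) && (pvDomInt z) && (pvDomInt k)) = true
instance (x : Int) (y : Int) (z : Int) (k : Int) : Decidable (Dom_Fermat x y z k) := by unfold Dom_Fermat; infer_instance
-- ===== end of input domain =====

-- B replaces A's decrement-by-one tail recursion with a single early-return loop over range(k, 2, -1); objective: simpler.


-- ===== PORT A =====
-- A recurses on k, decrementing until k == 2; the fuel (k-1).toNat only makes the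
-- recursion structural — for k ≥ 2 the 'k = 2' branch always fires before fuel runs out.
def FermatGo (x : Int) (y : Int) (z : Int) (k : Int) : Nat → String
  | 0 => "Good"
  | n + 1 =>
    if k = 2 then "Good"
    else
      if x ^ k.toNat + y ^ k.toNat = z ^ k.toNat then "Fermat is wrong"
      else FermatGo x y z (k - 1) n

def Fermat (x : Int) (y : Int) (z : Int) (k : Int) : String :=
  FermatGo x y z k (k - 1).toNat

-- ===== PORT B =====
-- Source B: for e in range(k, 2, -1): if x**e + y**e == z**e: return 'Fermat is wrong'; return 'Good'
def Fermat_alt (x : Int) (y : Int) (z : Int) (k : Int) : String :=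
  match (PySem.List.pyRange k 2 (-1)).find?
      (fun e => x ^ e.toNat + y ^ e.toNat == z ^ e.toNat) with
  | some _ => "Fermat is wrong"
  | none => "Good"

-- ===== PRECONDITION & SPEC =====
-- Pre_ restricts to the natural domain k ≥ 2: for k < 2 A recurses through ever lower
-- exponents the task never asked about, raising RecursionError unless an accidental
-- lower-exponent equality stops it (e.g. (0,0,0,1)), while B's empty range returns 'Good'.
def Pre_Fermat (x : Int) (y : Int) (z : Int) (k : Int) : Prop := 2 ≤ k
instance (x : Int) (y : Int) (z : Int) (k : Int) : Decidable (Pre_Fermat x y z k) := by unfold Pre_Fermat; infer_instance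
def pvWitness_Fermat : Int × Int × Int × Int := (3, 4, 5, 4)

def Spec_Fermat (x : Int) (y : Int) (z : Int) (k : Int) (out : String) : Prop := out = Fermat_alt x y z k
instance (x : Int) (y : Int) (z : Int) (k : Int) (out : String) : Decidable (Spec_Fermat x y z k out) := by unfold Spec_Fermat; infer_instance

-- ===== CLAIM (what is proved, stated in full; the proofs are below) =====
def Claim_equal_Fermat : Prop := ∀ (x : Int) (y : Int) (z : Int) (k : Int), Dom_Fermat x y z k → Pre_Fermat x y z k → Spec_Fermat x y z k (Fermat x y z k)

-- ===== LEMMAS AND PROOFS =====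
lemma FermatGo_eq_alt (x y z : Int) :
    ∀ (n : Nat) (k : Int), k = (n : Int) + 2 →
      FermatGo x y z k (n + 1) = Fermat_alt x y z k := by
  intro n
  induction n with
  | zero =>
    intro k hk
    subst hk
    simp [FermatGo, Fermat_alt]
  | succ m ih =>
    intro k hk
    have hk2 : k ≠ 2 := by omega
    have hgt : (2:Int) < k := by omega
    have hrange := PySem.List.pyRange_neg_one_cons (a := k) (b := 2) hgt
    rw [FermatGo, if_neg hk2]
    by_cases h : x ^ k.toNat + y ^ k.toNat = z ^ k.toNat
    · rw [if_pos h]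
      simp [Fermat_alt, hrange, h]
    · have hb : (x ^ k.toNat + y ^ k.toNat == z ^ k.toNat) = false := by simpa using h
      rw [if_neg h, ih (k - 1) (by omega)]
      unfold Fermat_alt
      rw [hrange]
      simp [hb]

theorem Fermat_spec : Claim_equal_Fermat := by
  intro x y z k _ hk
  unfold Spec_Fermat Fermat
  have hk2 : (2:Int) ≤ k := hk
  have h1 : (k - 1).toNat = (k - 2).toNat + 1 := by omega
  rw [h1]
  exact FermatGo_eq_alt x y z (k - 2).toNat k (by omega)
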